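-- pv_equiv track=rewrite | github.com/B3KNUR/PP2 | builtin.py | sumofletters
-- ===== SOURCE A (Python) =====
-- def sumofletters(letter):
--     uppercase = 0
--     lowercase = 0
--     for i in letter:
--         if i>='A' and i<='Z':
--             uppercase+=1
--         elif i>='a' and i<='z':
--             lowercase+=1
--     result = [lowercase, uppercase]
--     return result
-- ===== SOURCE B (Python) =====
-- def sumofletters(letter):
--     freq = {}
--     for ch in letter:
--         freq[ch] = freq.get(ch, 0) + 1
--     lowercase = sum(c for ch, c in freq.items() if 'a' <= ch <= 'z')
--     uppercase = sum(c for ch, c in freq.items() if 'A' <= ch <= 'Z')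
--     return [lowercase, uppercase]
-- ===== Notes on version B (the rewrite author's own statement) =====
-- stated objective: alternative
-- what changed: Replaces A's single per-character branching scan holding two counters with a tabulate-then-aggregate shape: build a character-frequency table in one pass, then sum the counts of the distinct keys falling in each ASCII range.
import Mathlib
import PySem

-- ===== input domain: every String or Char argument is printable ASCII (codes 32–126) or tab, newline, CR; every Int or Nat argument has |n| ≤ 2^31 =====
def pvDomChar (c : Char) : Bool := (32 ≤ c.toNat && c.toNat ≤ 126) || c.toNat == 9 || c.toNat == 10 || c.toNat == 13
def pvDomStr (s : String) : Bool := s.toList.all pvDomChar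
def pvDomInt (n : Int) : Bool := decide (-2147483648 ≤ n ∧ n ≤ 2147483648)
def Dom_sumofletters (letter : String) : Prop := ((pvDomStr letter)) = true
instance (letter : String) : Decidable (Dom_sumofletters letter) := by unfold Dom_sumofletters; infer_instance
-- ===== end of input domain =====

-- B replaces A's per-character two-counter branching scan by a frequency-table-then-aggregate
-- decomposition (same O(n) cost, different shape).

-- ===== PORT A =====
-- state = (uppercase, lowercase); result is [lowercase, uppercase]
def sumofletters (letter : String) : List Int :=
  let st := letter.toList.foldl (fun (st : Int × Int) i =>
    if 'A' ≤ i ∧ i ≤ 'Z' then (st.1 + 1, st.2)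
    else if 'a' ≤ i ∧ i ≤ 'z' then (st.1, st.2 + 1)
    else st) (0, 0)
  [st.2, st.1]

-- ===== PORT B =====
def sumofletters_alt (letter : String) : List Int :=
  let freq := letter.toList.foldl
    (fun (d : PySem.Dict Char Int) ch => d.insert ch (d.getD ch 0 + 1)) PySem.Dict.empty
  let lowercase := ((freq.items.filter (fun q => decide ('a' ≤ q.1) && decide (q.1 ≤ 'z'))).map (·.2)).sum
  let uppercase := ((freq.items.filter (fun q => decide ('A' ≤ q.1) && decide (q.1 ≤ 'Z'))).map (·.2)).sum
  [lowercase, uppercase]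

-- ===== PRECONDITION & SPEC =====
def Spec_sumofletters (letter : String) (out : List Int) : Prop := out = sumofletters_alt letter
instance (letter : String) (out : List Int) : Decidable (Spec_sumofletters letter out) := by unfold Spec_sumofletters; infer_instance

-- ===== CLAIM (what is proved, stated in full; the proofs are below) =====
def Claim_equal_sumofletters : Prop := ∀ (letter : String), Dom_sumofletters letter → Spec_sumofletters letter (sumofletters letter)

-- ===== LEMMAS AND PROOFS =====

-- the filtered sum over the frequency table's items is a countP of the original list
theorem counter_filter_sum (p : Char → Bool) (xs : List Char) :
    (((PySem.Dict.counter xs).items.filter (fun q => p q.1)).map (·.2)).sum = (xs.countP p : Int) := by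
  rw [PySem.Dict.items_counter]
  rw [List.filter_map, List.map_map]
  simp only [Function.comp_def]
  have hperm : ((PySem.Set.ofList xs).filter p).Perm (xs.dedup.filter p) := by
    apply List.Perm.filter
    rw [List.perm_ext_iff_of_nodup (PySem.Set.nodup_ofList xs) (List.nodup_dedup xs)]
    intro a; simp [PySem.Set.mem_ofList]
  rw [(hperm.map (fun k => ((xs.count k : Int)))).sum_eq]
  rw [← List.sum_map_count_dedup_filter_eq_countP p xs]
  push_cast [← List.map_map]
  simp [List.map_map, Function.comp_def]

-- A's loop computes the two countPs
theorem sumofletters_eq_countP (xs : List Char) :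
    xs.foldl (fun (st : Int × Int) i =>
      if 'A' ≤ i ∧ i ≤ 'Z' then (st.1 + 1, st.2)
      else if 'a' ≤ i ∧ i ≤ 'z' then (st.1, st.2 + 1)
      else st) (0, 0)
    = ((xs.countP (fun i => decide ('A' ≤ i ∧ i ≤ 'Z')) : Int),
       (xs.countP (fun i => decide ('a' ≤ i ∧ i ≤ 'z')) : Int)) := by
  have hbody : ∀ (st : Int × Int) (i : Char), i ∈ xs →
      (if 'A' ≤ i ∧ i ≤ 'Z' then (st.1 + 1, st.2)
       else if 'a' ≤ i ∧ i ≤ 'z' then (st.1, st.2 + 1)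
       else st)
      = ((fun acc i => if 'A' ≤ i ∧ i ≤ 'Z' then acc + 1 else acc) st.1 i,
         (fun acc i => if 'a' ≤ i ∧ i ≤ 'z' then acc + 1 else acc) st.2 i) := by
    intro st i _
    by_cases hu : 'A' ≤ i ∧ i ≤ 'Z'
    · have hnl : ¬ ('a' ≤ i ∧ i ≤ 'z') := by
        rintro ⟨hl, -⟩
        exact absurd (le_trans hl hu.2) (by decide)
      simp [hu, hnl]
    · by_cases hl : 'a' ≤ i ∧ i ≤ 'z' <;> simp [hu, hl]
  rw [PySem.List.foldl_congr_mem xs _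
    (fun (st : Int × Int) i =>
      ((fun acc i => if 'A' ≤ i ∧ i ≤ 'Z' then acc + 1 else acc) st.1 i,
       (fun acc i => if 'a' ≤ i ∧ i ≤ 'z' then acc + 1 else acc) st.2 i)) ((0 : Int), (0 : Int))
    hbody]
  rw [PySem.List.foldl_prod_mk
    (f := fun acc i => if 'A' ≤ i ∧ i ≤ 'Z' then acc + 1 else acc)
    (g := fun acc i => if 'a' ≤ i ∧ i ≤ 'z' then acc + 1 else acc)]
  rw [PySem.List.foldl_ite_add_one, PySem.List.foldl_ite_add_one]
  simp

-- ===== VERDICT (by name: the statement is the Claim_ definition above) =====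
theorem sumofletters_spec : Claim_equal_sumofletters := by
  intro letter _
  unfold Spec_sumofletters
  show sumofletters letter = sumofletters_alt letter
  simp only [sumofletters, sumofletters_alt,
    PySem.Dict.foldl_insert_getD_add_one_eq_counter, sumofletters_eq_countP,
    counter_filter_sum (fun ch => decide ('a' ≤ ch) && decide (ch ≤ 'z')),
    counter_filter_sum (fun ch => decide ('A' ≤ ch) && decide (ch ≤ 'Z'))]
  simp [Bool.decide_and]
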